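-- pv_equiv track=rewrite | github.com/ktBigDeal/customs-clearance | application-tier/models/model-chatbot/src/data_processing/pdf_chunking_utils.py | _generate_chunk_statistics
-- ===== SOURCE A (Python) =====
-- from typing import List, Dict, Any, Optional, Set, Tuple
--
-- def _generate_chunk_statistics(chunks: List[Dict]) -> Dict[str, Any]:
--     """청크 통계 정보 생성 (내부 함수)"""
--     if not chunks:
--         return {"total_chunks": 0}
--
--     content_lengths = [len(chunk.get("content", "")) for chunk in chunks]
--
--     return {
--         "total_chunks": len(chunks),
--         "total_content_length": sum(content_lengths),
--         "average_content_length": sum(content_lengths) // len(chunks),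
--         "min_content_length": min(content_lengths),
--         "max_content_length": max(content_lengths),
--         "median_content_length": sorted(content_lengths)[len(content_lengths) // 2]
--     }
-- ===== SOURCE B (Python) =====
-- def _generate_chunk_statistics(chunks):
--     """Chunk length statistics in one accumulator pass; median via quickselect, no sorting."""
--     if not chunks:
--         return {"total_chunks": 0}
--     n = 0
--     total = 0
--     lo = None
--     hi = None
--     lengths = []
--     for chunk in chunks:
--         v = len(chunk.get("content", ""))
--         lengths.append(v)
--         n += 1
--         total += v
--         if lo is None or v < lo:
--             lo = v
--         if hi is None or v > hi:
--             hi = v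
--     return {
--         "total_chunks": n,
--         "total_content_length": total,
--         "average_content_length": total // n,
--         "min_content_length": lo,
--         "max_content_length": hi,
--         "median_content_length": _quickselect(lengths, n // 2),
--     }
--
--
-- def _quickselect(xs, k):
--     """k-th smallest element (0-based) by three-way partition recursion."""
--     p = xs[0]
--     less = [x for x in xs if x < p]
--     if k < len(less):
--         return _quickselect(less, k)
--     neq = len(less) + sum(1 for x in xs if x == p)
--     if k < neq:
--         return p
--     return _quickselect([x for x in xs if x > p], k - neq)
-- ===== Notes on version B (the rewrite author's own statement) =====
-- stated objective: alternative
-- what changed: B makes one accumulator pass computing count, total and running min/max, and finds the median by recursive three-way-partition quickselect instead of A's sorted()-then-index plus separate min()/max()/sum() scans; B never sorts.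
import Mathlib
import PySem

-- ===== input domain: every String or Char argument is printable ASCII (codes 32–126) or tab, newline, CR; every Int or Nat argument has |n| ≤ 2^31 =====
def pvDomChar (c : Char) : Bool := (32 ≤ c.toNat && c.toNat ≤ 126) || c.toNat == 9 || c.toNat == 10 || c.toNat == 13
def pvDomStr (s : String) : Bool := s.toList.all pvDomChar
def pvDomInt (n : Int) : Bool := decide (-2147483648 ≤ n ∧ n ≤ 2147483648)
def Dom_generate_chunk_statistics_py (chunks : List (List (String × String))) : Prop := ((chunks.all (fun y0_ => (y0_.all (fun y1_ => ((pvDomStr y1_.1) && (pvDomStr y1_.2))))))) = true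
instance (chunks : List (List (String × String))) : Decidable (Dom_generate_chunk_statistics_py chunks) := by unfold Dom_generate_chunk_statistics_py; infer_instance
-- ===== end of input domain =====

-- B changes: one accumulator pass for count/total/running-min/running-max and a recursive
-- three-way-partition quickselect for the median (B never sorts), replacing A's separate
-- min()/max()/sum() scans and sorted()-then-index (alternative decomposition, similar cost).

-- ===== PORT A =====
def generate_chunk_statistics_py (chunks : List (List (String × String))) : List (String × Int) :=
  if chunks = [] then [("total_chunks", 0)]
  else
    let content_lengths := chunks.map (fun chunk =>
      PySem.Str.len (PySem.Dict.getD (PySem.Dict.ofList chunk) "content" ""))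
    [("total_chunks", PySem.List.len chunks),
     ("total_content_length", content_lengths.sum),
     ("average_content_length", PySem.Int.floordiv content_lengths.sum (PySem.List.len chunks)),
     ("min_content_length", (PySem.List.min? content_lengths (fun x => x)).getD 0),
     ("max_content_length", (PySem.List.max? content_lengths (fun x => x)).getD 0),
     ("median_content_length",
       PySem.List.pyGetD (PySem.List.sorted content_lengths (fun x => x) false)
         (PySem.Int.floordiv (PySem.List.len content_lengths) 2) 0)]

-- ===== PORT B =====
-- _quickselect: k-th smallest by three-way partition recursion.
-- The [] branch is only a totality guard (Python's xs[0] raises there; B's call never reaches it).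
def pvQuickselect : List Int → Int → Int
  | [], _ => 0
  | p :: t, k =>
    let xs := p :: t
    let less := xs.filter (fun x => x < p)
    if k < PySem.List.len less then pvQuickselect less k
    else
      let neq := PySem.List.len less + (xs.countP (fun x => x == p) : Int)
      if k < neq then p
      else pvQuickselect (xs.filter (fun x => p < x)) (k - neq)
termination_by xs _ => xs.length
decreasing_by
  · simp only [PySem.List.len_eq] at *
    simpa using Nat.lt_succ_of_le (by simpa using List.length_filter_le (fun x => decide (x < p)) t)
  · simpa using Nat.lt_succ_of_le (by simpa using List.length_filter_le (fun x => decide (p < x)) t)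

-- the for-loop body: state (n, total, lo, hi, lengths)
def pvStep (acc : Int × Int × Option Int × Option Int × List Int)
    (chunk : List (String × String)) : Int × Int × Option Int × Option Int × List Int :=
  let v := PySem.Str.len (PySem.Dict.getD (PySem.Dict.ofList chunk) "content" "")
  let lo := match acc.2.2.1 with
    | none => some v
    | some m => if v < m then some v else some m
  let hi := match acc.2.2.2.1 with
    | none => some v
    | some m => if m < v then some v else some m
  (acc.1 + 1, acc.2.1 + v, lo, hi, acc.2.2.2.2 ++ [v])

def generate_chunk_statistics_py_alt (chunks : List (List (String × String))) : List (String × Int) :=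
  if chunks = [] then [("total_chunks", 0)]
  else
    let st := chunks.foldl pvStep (0, 0, none, none, [])
    [("total_chunks", st.1),
     ("total_content_length", st.2.1),
     ("average_content_length", PySem.Int.floordiv st.2.1 st.1),
     ("min_content_length", st.2.2.1.getD 0),
     ("max_content_length", st.2.2.2.1.getD 0),
     ("median_content_length", pvQuickselect st.2.2.2.2 (PySem.Int.floordiv st.1 2))]

-- ===== PRECONDITION & SPEC =====
def Spec_generate_chunk_statistics_py (chunks : List (List (String × String))) (out : List (String × Int)) : Prop := out = generate_chunk_statistics_py_alt chunks
instance (chunks : List (List (String × String))) (out : List (String × Int)) : Decidable (Spec_generate_chunk_statistics_py chunks out) := by unfold Spec_generate_chunk_statistics_py; infer_instance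

-- ===== CLAIM (what is proved, stated in full; the proofs are below) =====
def Claim_equal_generate_chunk_statistics_py : Prop := ∀ (chunks : List (List (String × String))), Dom_generate_chunk_statistics_py chunks → Spec_generate_chunk_statistics_py chunks (generate_chunk_statistics_py chunks)

-- ===== LEMMAS AND PROOFS =====

def pvLen (chunk : List (String × String)) : Int :=
  PySem.Str.len (PySem.Dict.getD (PySem.Dict.ofList chunk) "content" "")

theorem pv_loop_spec (cs : List (List (String × String)))
    (n t : Int) (lo hi : Option Int) (ls : List Int) :
    cs.foldl pvStep (n, t, lo, hi, ls) =
      (n + cs.length, t + (cs.map pvLen).sum,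
       (cs.map pvLen).foldl (fun o v => match o with
         | none => some v | some m => if v < m then some v else some m) lo,
       (cs.map pvLen).foldl (fun o v => match o with
         | none => some v | some m => if m < v then some v else some m) hi,
       ls ++ cs.map pvLen) := by
  induction cs generalizing n t lo hi ls with
  | nil => simp
  | cons c cs ih =>
    simp only [List.foldl_cons, List.map_cons, List.sum_cons, pvStep, pvLen, ih]
    refine Prod.ext ?_ (Prod.ext ?_ ?_)
    · simp only [List.length_cons]; push_cast; ring
    · simp only []; ring
    · simp

theorem pv_foldl_min_some (t : List Int) (m : Int) :
    t.foldl (fun o v => match o with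
      | none => some v | some m => if v < m then some v else some m) (some m)
      = some (t.foldl min m) := by
  induction t generalizing m with
  | nil => rfl
  | cons x t ih =>
    have hstep : (fun (o : Option Int) v => match o with
        | none => some v | some m => if v < m then some v else some m) (some m) x
        = some (min m x) := by
      by_cases h : x < m
      · simp [h, min_eq_right h.le]
      · simp [h, min_eq_left (not_lt.mp h)]
    simp only [List.foldl_cons, hstep, ih]

theorem pv_foldl_max_some (t : List Int) (m : Int) :
    t.foldl (fun o v => match o with
      | none => some v | some m => if m < v then some v else some m) (some m)
      = some (t.foldl max m) := by
  induction t generalizing m with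
  | nil => rfl
  | cons x t ih =>
    have hstep : (fun (o : Option Int) v => match o with
        | none => some v | some m => if m < v then some v else some m) (some m) x
        = some (max m x) := by
      by_cases h : m < x
      · simp [h, max_eq_right h.le]
      · simp [h, max_eq_left (not_lt.mp h)]
    simp only [List.foldl_cons, hstep, ih]

theorem pv_count_filter_zero (xs : List Int) (q : Int → Bool) (a : Int) (h : q a = false) :
    List.count a (xs.filter q) = 0 :=
  List.count_eq_zero.mpr (fun hm => by
    have := (List.mem_filter.mp hm).2; rw [h] at this; exact Bool.false_ne_true this)

-- counting-sort shape of sorted xs around a pivot p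
theorem pv_sorted_partition (xs : List Int) (p : Int) :
    PySem.List.sorted xs (fun x => x) false =
      PySem.List.sorted (xs.filter (fun x => x < p)) (fun x => x) false
        ++ xs.filter (fun x => x = p)
        ++ PySem.List.sorted (xs.filter (fun x => p < x)) (fun x => x) false := by
  apply PySem.List.sorted_id_eq_of_perm_of_pairwise
  · rw [List.perm_iff_count]
    intro a
    have h1 := (PySem.List.sorted_perm (xs.filter (fun x => x < p)) (fun x => x) false).count_eq a
    have h3 := (PySem.List.sorted_perm (xs.filter (fun x => p < x)) (fun x => x) false).count_eq a
    simp only [List.count_append, h1, h3]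
    rcases lt_trichotomy a p with h | h | h
    · have e : List.count a (xs.filter (fun x => x < p)) = List.count a xs :=
        List.count_filter (by simp [h])
      have z1 : List.count a (xs.filter (fun x => x = p)) = 0 :=
        pv_count_filter_zero xs _ a (by simp; omega)
      have z2 : List.count a (xs.filter (fun x => p < x)) = 0 :=
        pv_count_filter_zero xs _ a (by simp; omega)
      omega
    · have e : List.count a (xs.filter (fun x => x = p)) = List.count a xs :=
        List.count_filter (by simp [h])
      have z1 : List.count a (xs.filter (fun x => x < p)) = 0 :=
        pv_count_filter_zero xs _ a (by simp; omega)
      have z2 : List.count a (xs.filter (fun x => p < x)) = 0 :=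
        pv_count_filter_zero xs _ a (by simp; omega)
      omega
    · have e : List.count a (xs.filter (fun x => p < x)) = List.count a xs :=
        List.count_filter (by simp [h])
      have z1 : List.count a (xs.filter (fun x => x < p)) = 0 :=
        pv_count_filter_zero xs _ a (by simp; omega)
      have z2 : List.count a (xs.filter (fun x => x = p)) = 0 :=
        pv_count_filter_zero xs _ a (by simp; omega)
      omega
  · have hless : ∀ x ∈ PySem.List.sorted (xs.filter (fun x => x < p)) (fun x => x) false, x < p := by
      intro x hx
      have := (PySem.List.mem_sorted _ _ _ _).mp hx
      simpa using (List.mem_filter.mp this).2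
    have heq : ∀ x ∈ xs.filter (fun x => x = p), x = p := by
      intro x hx; simpa using (List.mem_filter.mp hx).2
    have hgtr : ∀ x ∈ PySem.List.sorted (xs.filter (fun x => p < x)) (fun x => x) false, p < x := by
      intro x hx
      have := (PySem.List.mem_sorted _ _ _ _).mp hx
      simpa using (List.mem_filter.mp this).2
    rw [List.pairwise_append, List.pairwise_append]
    refine ⟨⟨by simpa using PySem.List.sorted_pairwise (xs.filter (fun x => x < p)) (fun x => x),
      List.pairwise_of_forall_mem_list (fun a ha b hb => by rw [heq a ha, heq b hb]),
      fun a ha b hb => (hless a ha).le.trans (heq b hb).ge⟩,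
      by simpa using PySem.List.sorted_pairwise (xs.filter (fun x => p < x)) (fun x => x),
      ?_⟩
    intro a ha b hb
    rcases List.mem_append.mp ha with ha | ha
    · exact ((hless a ha).trans (hgtr b hb)).le
    · rw [heq a ha]; exact (hgtr b hb).le

theorem pv_quickselect_eq (n : Nat) : ∀ xs : List Int, xs.length = n → ∀ k : Nat,
    k < xs.length →
    pvQuickselect xs (k : Int) = (PySem.List.sorted xs (fun x => x) false).getD k 0 := by
  induction n using Nat.strong_induction_on with
  | _ n ih =>
    intro xs hn k hk
    match xs, hn with
    | [], hn => simp at hk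
    | p :: t, hn =>
      set less := (p :: t).filter (fun x => x < p) with hless
      set eqf := (p :: t).filter (fun x => x = p) with heqf
      set gtr := (p :: t).filter (fun x => p < x) with hgtr
      have hpart := pv_sorted_partition (p :: t) p
      rw [← hless, ← heqf, ← hgtr] at hpart
      have ha : (PySem.List.sorted less (fun x => x) false).length = less.length :=
        PySem.List.length_sorted _ _ _
      have hc : (PySem.List.sorted gtr (fun x => x) false).length = gtr.length :=
        PySem.List.length_sorted _ _ _
      have hlen : less.length + eqf.length + gtr.length = (p :: t).length := by
        have := congrArg List.length hpart
        simp only [List.length_append, PySem.List.length_sorted] at this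
        omega
      have hlesslt : less.length < (p :: t).length := by
        have h0 : less = t.filter (fun x => x < p) := by simp [hless]
        rw [h0]
        exact Nat.lt_succ_of_le (List.length_filter_le _ _)
      have hgtrlt : gtr.length < (p :: t).length := by
        have h0 : gtr = t.filter (fun x => p < x) := by simp [hgtr]
        rw [h0]
        exact Nat.lt_succ_of_le (List.length_filter_le _ _)
      have hcount : ((p :: t).countP (fun x => x == p) : Int) = (eqf.length : Int) := by
        rw [heqf, List.countP_eq_length_filter]
        rfl
      rw [pvQuickselect]
      simp only [PySem.List.len_eq, ← hless, ← hgtr, hcount]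
      by_cases h1 : k < less.length
      · rw [if_pos (by exact_mod_cast h1)]
        rw [ih less.length (by omega) less rfl k h1, hpart]
        rw [List.getD_append _ _ _ k (by simp only [List.length_append, ha]; omega),
            List.getD_append _ _ _ k (by rw [ha]; omega)]
      · by_cases h2 : k < less.length + eqf.length
        · rw [if_neg (by omega), if_pos (by omega)]
          rw [hpart,
            List.getD_append _ _ _ k (by simp only [List.length_append, ha]; omega),
            List.getD_append_right _ _ _ k (by rw [ha]; omega),
            List.getD_eq_getElem _ _ (by rw [ha]; omega)]
          have hmem := List.getElem_mem
            (l := eqf)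
            (n := k - (PySem.List.sorted less (fun x => x) false).length)
            (by rw [ha]; omega)
          have hval : eqf[k - (PySem.List.sorted less (fun x => x) false).length] = p := by
            simpa using (List.mem_filter.mp hmem).2
          exact hval.symm
        · rw [if_neg (by omega), if_neg (by omega)]
          have hcast : (k : Int) - ((less.length : Int) + (eqf.length : Int))
              = ((k - (less.length + eqf.length) : Nat) : Int) := by omega
          rw [hcast, ih gtr.length (by omega) gtr rfl (k - (less.length + eqf.length))
              (by simp only [List.length_cons] at hk hlen; omega), hpart]
          rw [List.getD_append_right _ _ _ k
              (by simp only [List.length_append, ha]; omega)]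
          congr 1
          simp only [List.length_append, ha]

-- ===== VERDICT (by name: the statement is the Claim_ definition above) =====
theorem generate_chunk_statistics_py_spec : Claim_equal_generate_chunk_statistics_py := by
  intro chunks _
  unfold Spec_generate_chunk_statistics_py generate_chunk_statistics_py generate_chunk_statistics_py_alt
  by_cases h : chunks = []
  · simp [h]
  · simp only [if_neg h]
    rw [pv_loop_spec chunks 0 0 none none []]
    have hmap : chunks.map (fun chunk =>
        PySem.Str.len (PySem.Dict.getD (PySem.Dict.ofList chunk) "content" "")) =
        chunks.map pvLen := rfl
    rw [hmap]
    rcases hL : chunks.map pvLen with _ | ⟨l0, lrest⟩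
    · exact absurd (List.map_eq_nil_iff.mp hL) h
    have hlen : chunks.length = (l0 :: lrest).length := by
      rw [← hL, List.length_map]
    simp only [zero_add, List.nil_append, List.foldl_cons, pv_foldl_min_some,
      pv_foldl_max_some, PySem.List.min?_id_cons, PySem.List.max?_id_cons,
      PySem.List.len_eq, hlen]
    -- remaining differences: the median entry
    have hfd : PySem.Int.floordiv ((l0 :: lrest).length : Int) 2
        = (((l0 :: lrest).length / 2 : Nat) : Int) := by
      exact_mod_cast PySem.Int.floordiv_natCast (l0 :: lrest).length 2
    have hdiv : (l0 :: lrest).length / 2 < (l0 :: lrest).length :=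
      Nat.div_lt_self (by simp) (by omega)
    rw [hfd, PySem.List.pyGetD_natCast,
      pv_quickselect_eq (l0 :: lrest).length (l0 :: lrest) rfl _ hdiv]
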